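-- pv_equiv track=rewrite | github.com/Orinks/AccessiWeather | src/accessiweather/weather_client_aviation.py | _taf_indicates_no_data
-- ===== SOURCE A (Python) =====
-- def _taf_indicates_no_data(raw_taf: str) -> bool:
--     """
--     Determine whether the provided raw TAF string represents a NIL/no-data report.
--
--     The NWS TAF feed uses the token ``NIL`` (and occasionally phrases such as
--     ``NO TAF`` or ``NO DATA``) to indicate that no forecast is available. We
--     strip common header prefixes and examine the remaining tokens to detect this.
--     """
--     if not raw_taf:
--         return True
--
--     tokens = [token.rstrip("=").upper() for token in raw_taf.split()]
--     index = 0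
--
--     while index < len(tokens) and tokens[index] in {"TAF", "AMD", "COR"}:
--         index += 1
--
--     if index < len(tokens) and len(tokens[index]) == 4 and tokens[index].isalpha():
--         index += 1
--
--     if index < len(tokens) and tokens[index].endswith("Z") and len(tokens[index]) == 7:
--         index += 1
--
--     if index < len(tokens) and tokens[index].count("/") == 1:
--         index += 1
--
--     if index < len(tokens) and tokens[index] == "NIL":
--         return True
--
--     remaining = " ".join(tokens[index:])
--     return "NO TAF" in remaining or "NO DATA" in remaining
-- ===== SOURCE B (Python) =====
-- def _strip_header(tokens):
--     if tokens and tokens[0] in ("TAF", "AMD", "COR"):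
--         return _strip_header(tokens[1:])
--     rest = tokens
--     if rest and len(rest[0]) == 4 and rest[0].isalpha():
--         rest = rest[1:]
--     if rest and rest[0].endswith("Z") and len(rest[0]) == 7:
--         rest = rest[1:]
--     if rest and rest[0].count("/") == 1:
--         rest = rest[1:]
--     return rest
--
--
-- def _taf_indicates_no_data(raw_taf: str) -> bool:
--     if not raw_taf:
--         return True
--     tokens = [token.rstrip("=").upper() for token in raw_taf.split()]
--     rest = _strip_header(tokens)
--     if rest and rest[0] == "NIL":
--         return True
--     # "NO TAF"/"NO DATA" can only straddle a single join-space, since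
--     # tokens are whitespace-free: scan adjacent pairs instead of joining.
--     return any(
--         a.endswith("NO") and (b.startswith("TAF") or b.startswith("DATA"))
--         for a, b in zip(rest, rest[1:])
--     )
-- ===== Notes on version B (the rewrite author's own statement) =====
-- stated objective: alternative
-- what changed: B strips the TAF/AMD/COR header and the three optional header tokens by structural recursion on the token list and replaces A's index arithmetic plus 'NO TAF'/'NO DATA' substring search over a re-joined string by a single adjacent-pair scan (a endswith 'NO', next startswith 'TAF'/'DATA'), never rebuilding a string.
import Mathlib
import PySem

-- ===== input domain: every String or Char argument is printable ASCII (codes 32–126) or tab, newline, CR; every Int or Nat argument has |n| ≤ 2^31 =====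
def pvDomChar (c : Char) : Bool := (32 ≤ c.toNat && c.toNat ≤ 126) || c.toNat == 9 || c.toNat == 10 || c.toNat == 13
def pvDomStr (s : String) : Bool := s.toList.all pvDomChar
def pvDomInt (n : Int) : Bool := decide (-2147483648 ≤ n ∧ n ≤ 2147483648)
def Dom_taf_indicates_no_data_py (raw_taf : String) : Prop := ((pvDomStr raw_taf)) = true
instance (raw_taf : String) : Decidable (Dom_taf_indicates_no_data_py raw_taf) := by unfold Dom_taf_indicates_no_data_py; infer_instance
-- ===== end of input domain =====

-- B strips the header off the token LIST by structural recursion and replaces the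
-- "NO TAF"/"NO DATA" substring search over a re-joined string by one adjacent-pair scan
-- (objective: alternative; same cost, no string is rebuilt).

-- ===== PORT A =====
-- `token.rstrip("=")`: drop the trailing '=' characters (exact hand port; PySem has no chars-rstrip).
def pvRstripEq (t : List Char) : List Char := (t.reverse.dropWhile (fun c => c == '=')).reverse

-- `[token.rstrip("=").upper() for token in raw_taf.split()]` — the identical line of both Pythons.
def pvTokens (raw : String) : List (List Char) :=
  (PySem.Chars.split₀ raw.toList).map (fun t => PySem.Chars.upper (pvRstripEq t))

-- `tokens[index] in {"TAF", "AMD", "COR"}` (identical membership test in both Pythons).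
def pvIsHdrTok (t : List Char) : Bool :=
  t == "TAF".toList || t == "AMD".toList || t == "COR".toList

-- `while index < len(tokens) and tokens[index] in {...}: index += 1`
def pvWhileHdrA (tokens : List (List Char)) (index : Nat) : Nat :=
  if h : index < tokens.length ∧ pvIsHdrTok (tokens.getD index []) = true then
    pvWhileHdrA tokens (index + 1)
  else index
termination_by tokens.length - index
decreasing_by omega

def taf_indicates_no_data_py (raw_taf : String) : Bool :=
  if raw_taf.toList = [] then true   -- `if not raw_taf: return True`
  else
    let tokens := pvTokens raw_taf
    let i0 := pvWhileHdrA tokens 0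
    let i1 := if i0 < tokens.length ∧ (tokens.getD i0 []).length = 4 ∧
                 PySem.Chars.strIsalpha (tokens.getD i0 []) = true then i0 + 1 else i0
    let i2 := if i1 < tokens.length ∧ PySem.Chars.endswith (tokens.getD i1 []) "Z".toList = true ∧
                 (tokens.getD i1 []).length = 7 then i1 + 1 else i1
    let i3 := if i2 < tokens.length ∧ PySem.Chars.count (tokens.getD i2 []) "/".toList = 1
              then i2 + 1 else i2
    if i3 < tokens.length ∧ tokens.getD i3 [] = "NIL".toList then true
    else
      PySem.Chars.isIn "NO TAF".toList (PySem.Chars.join " ".toList (tokens.drop i3)) ||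
      PySem.Chars.isIn "NO DATA".toList (PySem.Chars.join " ".toList (tokens.drop i3))

-- ===== PORT B =====
-- the three single-token guards of `_strip_header`
def pvGuard1 (t : List Char) : Bool := t.length == 4 && PySem.Chars.strIsalpha t
def pvGuard2 (t : List Char) : Bool := PySem.Chars.endswith t "Z".toList && t.length == 7
def pvGuard3 (t : List Char) : Bool := PySem.Chars.count t "/".toList == 1

-- `if rest and p(rest[0]): rest = rest[1:]`
def pvDropIf (p : List Char → Bool) : List (List Char) → List (List Char)
  | [] => []
  | t :: ts => if p t then ts else t :: ts

def pvGuards (rest : List (List Char)) : List (List Char) :=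
  pvDropIf pvGuard3 (pvDropIf pvGuard2 (pvDropIf pvGuard1 rest))

-- `_strip_header(tokens)`
def pvStripHeader : List (List Char) → List (List Char)
  | [] => pvGuards []
  | t :: ts => if pvIsHdrTok t then pvStripHeader ts else pvGuards (t :: ts)

-- `any(a.endswith("NO") and (b.startswith("TAF") or b.startswith("DATA")) for a, b in zip(rest, rest[1:]))`
def pvAnyPair : List (List Char) → Bool
  | a :: b :: rs =>
      (PySem.Chars.endswith a "NO".toList &&
        (PySem.Chars.startswith b "TAF".toList || PySem.Chars.startswith b "DATA".toList))
      || pvAnyPair (b :: rs)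
  | _ => false

def taf_indicates_no_data_py_alt (raw_taf : String) : Bool :=
  if raw_taf.toList = [] then true
  else
    let rest := pvStripHeader (pvTokens raw_taf)
    if (match rest with | t :: _ => t == "NIL".toList | [] => false) then true
    else pvAnyPair rest

-- ===== PRECONDITION & SPEC =====
def Spec_taf_indicates_no_data_py (raw_taf : String) (out : Bool) : Prop := out = taf_indicates_no_data_py_alt raw_taf
instance (raw_taf : String) (out : Bool) : Decidable (Spec_taf_indicates_no_data_py raw_taf out) := by unfold Spec_taf_indicates_no_data_py; infer_instance

-- ===== CLAIM (what is proved, stated in full; the proofs are below) =====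
def Claim_equal_taf_indicates_no_data_py : Prop := ∀ (raw_taf : String), Dom_taf_indicates_no_data_py raw_taf → Spec_taf_indicates_no_data_py raw_taf (taf_indicates_no_data_py raw_taf)

-- ===== LEMMAS AND PROOFS =====

-- Prop mirror of pvAnyPair's generic step, used to relate it to the substring search
def pvPairProp (pre suf : List Char) : List (List Char) → Prop
  | a :: b :: rs => (pre <:+ a ∧ suf <+: b) ∨ pvPairProp pre suf (b :: rs)
  | _ => False

theorem pvDrop_getD (tokens : List (List Char)) (i : Nat) (t : List Char) (ts : List (List Char))
    (h : tokens.drop i = t :: ts) : tokens.getD i [] = t := by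
  have h0 : tokens[i]? = some t := by
    have := List.getElem?_drop (xs := tokens) (i := i) (j := 0)
    rw [h] at this
    simpa using this.symm
  simp [List.getD_eq_getElem?_getD, h0]

-- A's while loop drops exactly the dropWhile prefix
theorem pvWhileHdrA_drop (tokens : List (List Char)) (i : Nat) :
    tokens.drop (pvWhileHdrA tokens i) = List.dropWhile pvIsHdrTok (tokens.drop i) := by
  induction i using pvWhileHdrA.induct tokens with
  | case1 i h ih =>
      rw [pvWhileHdrA, dif_pos h]
      obtain ⟨hlen, hhdr⟩ := h
      obtain ⟨t, ts, hd⟩ : ∃ t ts, tokens.drop i = t :: ts := by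
        cases hdd : tokens.drop i with
        | nil => exact absurd (List.drop_eq_nil_iff.mp hdd) (by omega)
        | cons t ts => exact ⟨t, ts, rfl⟩
      rw [pvDrop_getD tokens i t ts hd] at hhdr
      rw [ih, hd, List.dropWhile_cons, if_pos hhdr]
      have hts : tokens.drop (i+1) = ts := by
        rw [← List.drop_drop, hd]; rfl
      rw [hts]
  | case2 i h =>
      rw [pvWhileHdrA, dif_neg h]
      cases hdd : tokens.drop i with
      | nil => simp
      | cons t ts =>
          have hlen : i < tokens.length := by
            by_contra hh
            rw [List.drop_eq_nil_iff.mpr (by omega)] at hdd; cases hdd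
          have hhdr : ¬ pvIsHdrTok t = true := by
            intro hh
            exact h ⟨hlen, by rw [pvDrop_getD tokens i t ts hdd]; exact hh⟩
          simp [hhdr]

-- A's `if index < len(tokens) and <guard>: index += 1` step, seen through List.drop
theorem pvGuardStep (tokens : List (List Char)) (i : Nat) (p : List Char → Bool) (c : Prop)
    [Decidable c] (hc : c ↔ (i < tokens.length ∧ p (tokens.getD i []) = true)) :
    tokens.drop (if c then i + 1 else i) = pvDropIf p (tokens.drop i) := by
  cases hdd : tokens.drop i with
  | nil =>
      have hni : ¬ c := by
        rw [hc]; rintro ⟨hlen, -⟩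
        have := List.drop_eq_nil_iff.mp hdd; omega
      simp [hni, hdd, pvDropIf]
  | cons t ts =>
      have hlen : i < tokens.length := by
        by_contra hh
        rw [List.drop_eq_nil_iff.mpr (by omega)] at hdd; cases hdd
      have hgd := pvDrop_getD tokens i t ts hdd
      have hts : tokens.drop (i+1) = ts := by rw [← List.drop_drop, hdd]; rfl
      by_cases hp : p t = true
      · have hcc : c := hc.mpr ⟨hlen, by rw [hgd]; exact hp⟩
        simp [hcc, hts, pvDropIf, hp]
      · have hni : ¬ c := by rw [hc]; rintro ⟨-, hh⟩; rw [hgd] at hh; exact hp hh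
        simp [hni, hdd, pvDropIf, hp]

theorem pvStripHeader_eq (ts : List (List Char)) :
    pvStripHeader ts = pvGuards (List.dropWhile pvIsHdrTok ts) := by
  induction ts with
  | nil => rfl
  | cons t ts ih =>
      by_cases h : pvIsHdrTok t = true
      · simp [pvStripHeader, h, ih]
      · simp [pvStripHeader, h]

theorem upperChar_space_eq (c : Char) (h : PySem.Chars.upperChar c = ' ') : c = ' ' := by
  unfold PySem.Chars.upperChar at h
  by_cases hl : PySem.Chars.islower c = true
  · exfalso
    rw [if_pos hl] at h
    simp [PySem.Chars.islower, Char.le_def, UInt32.le_iff_toNat_le] at hl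
    have h2 : (Char.ofNat (c.toNat - 32)).toNat = 32 := by rw [h]; decide
    rw [Char.toNat_ofNat, if_pos (by left; omega)] at h2
    omega
  · rwa [if_neg hl] at h

theorem pvSplitGo_nospace : ∀ (s cur : List Char) (acc : List (List Char)),
    (∀ c ∈ cur, PySem.Chars.isspace c = false) →
    (∀ t ∈ acc, ∀ c ∈ t, PySem.Chars.isspace c = false) →
    ∀ t ∈ PySem.Chars.split₀.go s cur acc, ∀ c ∈ t, PySem.Chars.isspace c = false
  | [], cur, acc => by
      intro hcur hacc t ht
      unfold PySem.Chars.split₀.go at ht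
      by_cases he : cur.isEmpty = true
      · rw [if_pos he] at ht
        exact hacc t (by simpa using ht)
      · rw [if_neg he] at ht
        simp only [List.reverse_cons] at ht
        rcases List.mem_append.mp ht with h | h
        · exact hacc t (List.mem_reverse.mp h)
        · have h' : t = cur.reverse := by simpa using h
          subst h'
          exact fun c hc => hcur c (List.mem_reverse.mp hc)
  | c :: rest, cur, acc => by
      intro hcur hacc t ht
      unfold PySem.Chars.split₀.go at ht
      by_cases hs : PySem.Chars.isspace c = true
      · rw [if_pos hs] at ht
        by_cases he : cur.isEmpty = true
        · rw [if_pos he] at ht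
          exact pvSplitGo_nospace rest [] acc (by simp) hacc t ht
        · rw [if_neg he] at ht
          refine pvSplitGo_nospace rest [] (cur.reverse :: acc) (by simp) ?_ t ht
          intro t' ht' c' hc'
          rcases List.mem_cons.mp ht' with h | h
          · subst h; exact hcur c' (List.mem_reverse.mp hc')
          · exact hacc _ h c' hc'
      · rw [if_neg hs] at ht
        refine pvSplitGo_nospace rest (c :: cur) acc ?_ hacc t ht
        intro c' hc'
        rcases List.mem_cons.mp hc' with h | h
        · subst h; simpa using hs
        · exact hcur c' h

theorem pvTokens_nospace (raw : String) : ∀ t ∈ pvTokens raw, ' ' ∉ t := by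
  intro t ht hsp
  unfold pvTokens at ht
  rcases List.mem_map.mp ht with ⟨t0, ht0, rfl⟩
  unfold PySem.Chars.upper at hsp
  rcases List.mem_map.mp hsp with ⟨c0, hc0, hc0u⟩
  have hc0' : c0 = ' ' := upperChar_space_eq c0 hc0u
  subst hc0'
  have hmem : (' ' : Char) ∈ t0 := by
    unfold pvRstripEq at hc0
    have := List.mem_reverse.mp hc0
    exact List.mem_reverse.mp ((List.dropWhile_sublist _).mem this)
  have := pvSplitGo_nospace raw.toList [] [] (by simp) (by simp) t0 ht0 ' ' hmem
  simp [PySem.Chars.isspace] at this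

-- prefix through one join-space: the pattern's space must sit exactly on the separator
theorem pvP2 (pre suf a' J : List Char) (hpre : ' ' ∉ pre) (ha : ' ' ∉ a') :
    pre ++ ' ' :: suf <+: a' ++ ' ' :: J ↔ (pre = a' ∧ suf <+: J) := by
  induction pre generalizing a' with
  | nil =>
      cases a' with
      | nil => simp [List.cons_prefix_cons]
      | cons d a'' =>
          simp only [List.nil_append, List.cons_append, List.cons_prefix_cons]
          constructor
          · rintro ⟨h1, -⟩; exact absurd h1.symm (by intro hh; exact ha (by simp [hh]))
          · rintro ⟨h, -⟩; cases h
  | cons c pre' ih =>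
      cases a' with
      | nil =>
          simp only [List.cons_append, List.nil_append, List.cons_prefix_cons]
          constructor
          · rintro ⟨h1, -⟩; exact absurd h1 (by intro hh; exact hpre (by simp [hh]))
          · rintro ⟨h, -⟩; cases h
      | cons d a'' =>
          simp only [List.cons_append, List.cons_prefix_cons]
          rw [ih a'' (by intro hh; exact hpre (List.mem_cons_of_mem _ hh))
                 (by intro hh; exact ha (List.mem_cons_of_mem _ hh))]
          constructor
          · rintro ⟨h1, h2, h3⟩; exact ⟨by rw [h1, h2], h3⟩
          · rintro ⟨h, h3⟩; cases h; exact ⟨rfl, rfl, h3⟩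

theorem pvP3 (suf b K : List Char) (hsuf : ' ' ∉ suf) :
    suf <+: b ++ ' ' :: K ↔ suf <+: b := by
  induction suf generalizing b with
  | nil => simp
  | cons c s' ih =>
      cases b with
      | nil =>
          simp only [List.nil_append, List.cons_prefix_cons]
          constructor
          · rintro ⟨h1, -⟩; exact absurd h1 (by intro hh; exact hsuf (by simp [hh]))
          · rintro h; exact absurd (List.prefix_nil.mp h) (by simp)
      | cons d b'' =>
          simp only [List.cons_append, List.cons_prefix_cons]
          rw [ih _ (by intro hh; exact hsuf (List.mem_cons_of_mem _ hh))]

theorem pvPrefixJoin (suf b : List Char) (rs : List (List Char)) (hsuf : ' ' ∉ suf) :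
    suf <+: PySem.Chars.join " ".toList (b :: rs) ↔ suf <+: b := by
  cases rs with
  | nil => rw [PySem.Chars.join_singleton]
  | cons r rs' =>
      rw [PySem.Chars.join_cons_cons]
      have he : b ++ " ".toList ++ PySem.Chars.join " ".toList (r :: rs')
           = b ++ ' ' :: PySem.Chars.join " ".toList (r :: rs') := by simp
      rw [he, pvP3 _ _ _ hsuf]

theorem pvNotInfixToken (pre suf a : List Char) (ha : ' ' ∉ a) :
    ¬ (pre ++ ' ' :: suf <:+: a) := by
  intro h
  exact ha (h.subset (by simp))

theorem pvL1 (pre suf a J : List Char) (hpre : ' ' ∉ pre) (ha : ' ' ∉ a) :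
    pre ++ ' ' :: suf <:+: a ++ ' ' :: J ↔ ((pre <:+ a ∧ suf <+: J) ∨ pre ++ ' ' :: suf <:+: J) := by
  induction a with
  | nil =>
      rw [List.nil_append, List.infix_cons_iff]
      have h2 := pvP2 pre suf [] J hpre (by simp)
      simp only [List.nil_append] at h2
      rw [h2]
      simp [List.suffix_nil]
  | cons c a' ih =>
      have ha' : ' ' ∉ a' := by intro hh; exact ha (List.mem_cons_of_mem _ hh)
      rw [List.cons_append, List.infix_cons_iff]
      have h2 := pvP2 pre suf (c :: a') J hpre ha
      simp only [List.cons_append] at h2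
      rw [h2, ih ha', List.suffix_cons_iff]
      constructor
      · rintro (⟨h1, h3⟩ | (⟨h1, h3⟩ | h))
        · exact Or.inl ⟨Or.inl h1, h3⟩
        · exact Or.inl ⟨Or.inr h1, h3⟩
        · exact Or.inr h
      · rintro (⟨(h1 | h1), h3⟩ | h)
        · exact Or.inl ⟨h1, h3⟩
        · exact Or.inr (Or.inl ⟨h1, h3⟩)
        · exact Or.inr (Or.inr h)

theorem pvJoinInfix (pre suf : List Char) (hpre : ' ' ∉ pre) (hsuf : ' ' ∉ suf) :
    ∀ (rest : List (List Char)), (∀ t ∈ rest, ' ' ∉ t) →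
    ((pre ++ ' ' :: suf <:+: PySem.Chars.join " ".toList rest) ↔ pvPairProp pre suf rest)
  | [] => by
      intro _
      rw [PySem.Chars.join_nil]
      simp [pvPairProp, List.infix_nil]
  | [a] => by
      intro hrest
      rw [PySem.Chars.join_singleton]
      simp [pvPairProp, pvNotInfixToken pre suf a (hrest a (by simp))]
  | a :: b :: rs => by
      intro hrest
      have ha : ' ' ∉ a := hrest a (by simp)
      have hb : ∀ t ∈ b :: rs, ' ' ∉ t := fun t ht => hrest t (List.mem_cons_of_mem _ ht)
      rw [PySem.Chars.join_cons_cons]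
      have he : a ++ " ".toList ++ PySem.Chars.join " ".toList (b :: rs)
           = a ++ ' ' :: PySem.Chars.join " ".toList (b :: rs) := by simp
      rw [he, pvL1 pre suf a _ hpre ha,
          pvPrefixJoin suf b rs hsuf,
          pvJoinInfix pre suf hpre hsuf (b :: rs) hb]
      rfl

theorem pvAnyPair_iff : ∀ (rest : List (List Char)),
    (pvAnyPair rest = true ↔
      (pvPairProp "NO".toList "TAF".toList rest ∨ pvPairProp "NO".toList "DATA".toList rest))
  | [] => by simp [pvAnyPair, pvPairProp]
  | [a] => by simp [pvAnyPair, pvPairProp]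
  | a :: b :: rs => by
      rw [show pvAnyPair (a :: b :: rs) = ((PySem.Chars.endswith a "NO".toList &&
        (PySem.Chars.startswith b "TAF".toList || PySem.Chars.startswith b "DATA".toList))
        || pvAnyPair (b :: rs)) from rfl]
      rw [Bool.or_eq_true, Bool.and_eq_true, Bool.or_eq_true,
          PySem.Chars.endswith_iff, PySem.Chars.startswith_iff, PySem.Chars.startswith_iff,
          pvAnyPair_iff (b :: rs)]
      show _ ↔ (_ ∨ pvPairProp _ _ (b :: rs)) ∨ (_ ∨ pvPairProp _ _ (b :: rs))
      tauto

-- the tail check: substring search over the re-joined tail = adjacent-pair scan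
theorem pvTailEq (rest : List (List Char)) (hns : ∀ t ∈ rest, ' ' ∉ t) :
    (PySem.Chars.isIn "NO TAF".toList (PySem.Chars.join " ".toList rest) ||
     PySem.Chars.isIn "NO DATA".toList (PySem.Chars.join " ".toList rest)) = pvAnyPair rest := by
  have e1 : "NO TAF".toList = "NO".toList ++ ' ' :: "TAF".toList := by decide
  have e2 : "NO DATA".toList = "NO".toList ++ ' ' :: "DATA".toList := by decide
  rw [Bool.eq_iff_iff, Bool.or_eq_true, PySem.Chars.isIn_iff_infix, PySem.Chars.isIn_iff_infix,
      e1, e2,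
      pvJoinInfix _ _ (by decide) (by decide) rest hns,
      pvJoinInfix _ _ (by decide) (by decide) rest hns,
      pvAnyPair_iff rest]

-- the final comparison, once A's index is known to cut the token list where B's recursion does
theorem pvFinish (tokens : List (List Char)) (i3 : Nat)
    (hrest : tokens.drop i3 = pvStripHeader tokens) (hns : ∀ t ∈ tokens, ' ' ∉ t) :
    (if i3 < tokens.length ∧ tokens.getD i3 [] = "NIL".toList then true
     else PySem.Chars.isIn "NO TAF".toList (PySem.Chars.join " ".toList (tokens.drop i3)) ||
          PySem.Chars.isIn "NO DATA".toList (PySem.Chars.join " ".toList (tokens.drop i3)))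
    = (if (match pvStripHeader tokens with | t :: _ => t == "NIL".toList | [] => false) then true
       else pvAnyPair (pvStripHeader tokens)) := by
  rw [← hrest]
  cases hdd : tokens.drop i3 with
  | nil =>
      have hlen := List.drop_eq_nil_iff.mp hdd
      rw [if_neg (by rintro ⟨h1, -⟩; omega)]
      decide
  | cons t ts =>
      have hlen : i3 < tokens.length := by
        by_contra hh
        rw [List.drop_eq_nil_iff.mpr (by omega)] at hdd; cases hdd
      have hgd := pvDrop_getD tokens i3 t ts hdd
      by_cases ht : t = "NIL".toList
      · rw [if_pos ⟨hlen, by rw [hgd]; exact ht⟩]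
        simp [ht]
      · rw [if_neg (by rintro ⟨-, hh⟩; rw [hgd] at hh; exact ht hh)]
        simp only [show (t == "NIL".toList) = false from by simpa using ht,
          Bool.false_eq_true, if_false]
        refine pvTailEq (t :: ts) ?_
        intro u hu
        rw [← hdd] at hu
        exact hns u (List.mem_of_mem_drop hu)

-- ===== VERDICT (by name: the statement is the Claim_ definition above) =====
theorem taf_indicates_no_data_py_spec : Claim_equal_taf_indicates_no_data_py := by
  intro raw _dom
  unfold Spec_taf_indicates_no_data_py
  by_cases hn : raw.toList = []
  · simp [taf_indicates_no_data_py, taf_indicates_no_data_py_alt, hn]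
  · simp only [taf_indicates_no_data_py, taf_indicates_no_data_py_alt, if_neg hn]
    set tokens := pvTokens raw with htok
    set i0 := pvWhileHdrA tokens 0 with hi0
    have h0 : tokens.drop i0 = List.dropWhile pvIsHdrTok tokens := by
      rw [hi0, pvWhileHdrA_drop tokens 0, List.drop_zero]
    set i1 := (if i0 < tokens.length ∧ (tokens.getD i0 []).length = 4 ∧
                 PySem.Chars.strIsalpha (tokens.getD i0 []) = true then i0 + 1 else i0) with hi1
    have h1 : tokens.drop i1 = pvDropIf pvGuard1 (tokens.drop i0) := by
      rw [hi1]
      exact pvGuardStep tokens i0 pvGuard1 _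
        (by simp only [pvGuard1, Bool.and_eq_true, beq_iff_eq])
    set i2 := (if i1 < tokens.length ∧ PySem.Chars.endswith (tokens.getD i1 []) "Z".toList = true ∧
                 (tokens.getD i1 []).length = 7 then i1 + 1 else i1) with hi2
    have h2 : tokens.drop i2 = pvDropIf pvGuard2 (tokens.drop i1) := by
      rw [hi2]
      exact pvGuardStep tokens i1 pvGuard2 _
        (by simp only [pvGuard2, Bool.and_eq_true, beq_iff_eq])
    set i3 := (if i2 < tokens.length ∧ PySem.Chars.count (tokens.getD i2 []) "/".toList = 1
               then i2 + 1 else i2) with hi3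
    have h3 : tokens.drop i3 = pvDropIf pvGuard3 (tokens.drop i2) := by
      rw [hi3]
      exact pvGuardStep tokens i2 pvGuard3 _
        (by simp only [pvGuard3, beq_iff_eq])
    have hrest : tokens.drop i3 = pvStripHeader tokens := by
      rw [h3, h2, h1, h0, pvStripHeader_eq]; rfl
    exact pvFinish tokens i3 hrest (pvTokens_nospace raw)
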